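-- pv_equiv track=rewrite | github.com/amrithajayadev/misc | strings/max_len_concatenated_string_unique_chars.py | max_len_str_unique_chars
-- ===== SOURCE A (Python) =====
-- def max_len_str_unique_chars(words):
--     unique_strs = ['', ]
--     max_len = 0
--
--     def valid(s):
--         return len(s) == len(set(s))
--
--     for word in words:
--         for s in unique_strs:
--             if valid(word + s):
--                 unique_strs.append(word + s)
--                 max_len = max(max_len, len(word) + len(s))
--     return max_len
-- ===== SOURCE B (Python) =====
-- def max_len_str_unique_chars(words):
--     # Depth-first include/exclude recursion over the word list with one running
--     # character set: O(n) extra memory instead of an exponential frontier list,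
--     # and no concatenated strings are ever built or re-validated.
--     def go(i, used):
--         if i == len(words):
--             return 0
--         best = go(i + 1, used)
--         w = words[i]
--         cs = set(w)
--         if len(cs) == len(w) and used.isdisjoint(cs):
--             best = max(best, len(w) + go(i + 1, used | cs))
--         return best
--     return go(0, set())
-- ===== Notes on version B (the rewrite author's own statement) =====
-- stated objective: alternative
-- what changed: A iterates over a growing frontier list of concatenated strings, re-validating each candidate with len(set(word+s)); B is a depth-first include/exclude recursion over the word list carrying a single running character set, so no frontier collection and no concatenations exist at all and memory drops from exponential to O(n) recursion depth.
-- outside the precondition, e.g. on max_len_str_unique_chars(['']): A does not finish within the time limit, B returns 0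
import Mathlib
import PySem

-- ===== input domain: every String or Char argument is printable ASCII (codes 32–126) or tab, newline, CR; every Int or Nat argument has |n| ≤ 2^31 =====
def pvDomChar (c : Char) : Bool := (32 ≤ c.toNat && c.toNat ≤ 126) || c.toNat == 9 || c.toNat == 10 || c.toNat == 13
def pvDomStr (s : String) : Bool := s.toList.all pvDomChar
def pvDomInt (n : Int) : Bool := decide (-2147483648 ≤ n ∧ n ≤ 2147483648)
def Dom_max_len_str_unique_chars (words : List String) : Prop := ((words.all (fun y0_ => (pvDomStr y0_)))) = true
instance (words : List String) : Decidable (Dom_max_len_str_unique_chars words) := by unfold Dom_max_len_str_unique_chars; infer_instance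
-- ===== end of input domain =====

-- B replaces A's growing frontier list of concatenated strings (each re-validated via
-- len(set(word+s))) with a depth-first include/exclude recursion carrying one running
-- character set; equivalence of the RETURN value is proved on Pre_ (inputs without the
-- empty string, where Python A never returns).


-- ===== PORT A =====
-- valid(s): len(s) == len(set(s))
def pvValid (s : List Char) : Bool := (s.length : Int) == PySem.Set.len (PySem.Set.ofList s)

-- Python's 'for s in unique_strs' keeps iterating over elements appended during the loop;
-- modelled exactly by a pending list (the remaining iteration positions) plus the full list.
-- The fuel only makes the recursion total: 2*len+1 steps cover every terminating Python run
-- (word ≠ ''); inputs containing '' (where the Python loop never ends) are outside Pre_.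
def pvInner (w : List Char) : Nat → List (List Char) → List (List Char) → Int →
    (List (List Char) × Int)
  | 0, _, full, m => (full, m)
  | _ + 1, [], full, m => (full, m)
  | f + 1, s :: rest, full, m =>
    if pvValid (w ++ s) then
      pvInner w f (rest ++ [w ++ s]) (full ++ [w ++ s])
        (max m ((w.length : Int) + (s.length : Int)))
    else
      pvInner w f rest full m

def max_len_str_unique_chars (words : List String) : Int :=
  (words.foldl
    (fun (st : List (List Char) × Int) word =>
      pvInner word.toList (2 * st.1.length + 1) st.1 st.1 st.2)
    ([[]], 0)).2

-- ===== PORT B =====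
-- go(i, used): best additional length from words[i:] given the used character set;
-- ported as structural recursion on the remaining word list.
def pvGo : List String → PySem.Set Char → Int
  | [], _ => 0
  | w :: rest, used =>
    let best := pvGo rest used
    let cs := PySem.Set.ofList w.toList
    if PySem.Set.len cs == (w.toList.length : Int) && PySem.Set.isdisjoint used cs then
      max best ((w.toList.length : Int) + pvGo rest (PySem.Set.union used cs))
    else best

def max_len_str_unique_chars_alt (words : List String) : Int :=
  pvGo words PySem.Set.empty

-- ===== PRECONDITION & SPEC =====
-- Pre_ excludes inputs containing the empty string: there Python A appends '' + s = s to the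
-- very list it is iterating over and DIVERGES (never returns a value), while B terminates.
def Pre_max_len_str_unique_chars (words : List String) : Prop := "" ∉ words
instance (words : List String) : Decidable (Pre_max_len_str_unique_chars words) := by
  unfold Pre_max_len_str_unique_chars; infer_instance
def pvWitness_max_len_str_unique_chars : List String := ["ab", "cd"]

def Spec_max_len_str_unique_chars (words : List String) (out : Int) : Prop := out = max_len_str_unique_chars_alt words
instance (words : List String) (out : Int) : Decidable (Spec_max_len_str_unique_chars words out) := by unfold Spec_max_len_str_unique_chars; infer_instance

-- ===== CLAIM (what is proved, stated in full; the proofs are below) =====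
def Claim_equal_max_len_str_unique_chars : Prop := ∀ (words : List String), Dom_max_len_str_unique_chars words → Pre_max_len_str_unique_chars words → Spec_max_len_str_unique_chars words (max_len_str_unique_chars words)

-- ===== LEMMAS AND PROOFS =====

theorem pvValid_iff (s : List Char) : pvValid s = true ↔ s.Nodup := by
  have hperm : (PySem.Set.ofList s).Perm s.dedup := by
    refine (List.perm_ext_iff_of_nodup (PySem.Set.nodup_ofList s) s.nodup_dedup).2 ?_
    intro a; simp [PySem.Set.mem_ofList, List.mem_dedup]
  have hlen : (PySem.Set.ofList s).length = s.dedup.length := hperm.length_eq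
  constructor
  · intro h
    have : (s.length : Int) = PySem.Set.len (PySem.Set.ofList s) := by
      simpa [pvValid] using h
    have h2 : s.dedup.length = s.length := by
      simp [PySem.Set.len, hlen] at this; omega
    have := (List.dedup_sublist s).eq_of_length h2
    rw [← this]; exact s.nodup_dedup
  · intro h
    simp [pvValid, PySem.Set.len, PySem.Set.ofList_eq_self_of_nodup s h]

theorem pvInner_dead (w : List Char) :
    ∀ (Q : List (List Char)) (f : Nat) (full : List (List Char)) (m : Int),
      (∀ q ∈ Q, pvValid (w ++ q) = false) → Q.length ≤ f →
      pvInner w f Q full m = (full, m) := by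
  intro Q
  induction Q with
  | nil => intro f full m _ _; cases f <;> simp [pvInner]
  | cons q rest ih =>
    intro f full m hdead hf
    cases f with
    | zero => simp at hf
    | succ f =>
      simp only [pvInner, hdead q (by simp)]
      simp only [Bool.false_eq_true, if_false]
      exact ih f full m (fun x hx => hdead x (by simp [hx])) (by simp at hf ⊢; omega)

theorem pvValid_ww (w s : List Char) (hw : w ≠ []) : pvValid (w ++ (w ++ s)) = false := by
  rcases w with _ | ⟨c, t⟩
  · simp at hw
  · rw [← Bool.not_eq_true, pvValid_iff]
    intro h
    rw [List.nodup_append] at h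
    exact h.2.2 c (by simp) c (by simp) rfl

-- one word of A's loop: the items appended while iterating are never extended again
-- (word ≠ []), so the pass equals snapshot-filter-and-append
theorem pvInner_spec (w : List Char) (hw : w ≠ []) :
    ∀ (P Q full : List (List Char)) (m : Int) (f : Nat),
      (∀ q ∈ Q, pvValid (w ++ q) = false) →
      P.length + Q.length + (P.filter (fun s => pvValid (w ++ s))).length ≤ f →
      pvInner w f (P ++ Q) full m =
        (full ++ (P.filter (fun s => pvValid (w ++ s))).map (w ++ ·),
         (P.filter (fun s => pvValid (w ++ s))).foldl
           (fun m s => max m ((w.length : Int) + (s.length : Int))) m) := by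
  intro P
  induction P with
  | nil =>
    intro Q full m f hdead hf
    simpa using pvInner_dead w Q f full m hdead (by simp at hf; omega)
  | cons s P ih =>
    intro Q full m f hdead hf
    cases f with
    | zero => simp at hf
    | succ f =>
      by_cases hv : pvValid (w ++ s) = true
      · simp only [List.cons_append, pvInner, hv, if_true]
        rw [List.append_assoc P Q [w ++ s]]
        rw [ih (Q ++ [w ++ s]) (full ++ [w ++ s]) _ f ?_ ?_]
        · simp [hv, List.append_assoc]
        · intro q hq
          rcases List.mem_append.1 hq with h | h
          · exact hdead q h
          · simp at h; subst h; exact pvValid_ww w s hw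
        · have h1 : ((s :: P).filter (fun s => pvValid (w ++ s))).length
              = (P.filter (fun s => pvValid (w ++ s))).length + 1 := by
            simp [hv]
          simp at hf ⊢; omega
      · simp only [List.cons_append, pvInner, hv]
        simp only [Bool.false_eq_true, if_false]
        simp only [Bool.not_eq_true] at hv
        rw [ih Q full m f hdead ?_]
        · simp [hv]
        · have : ((s :: P).filter (fun s => pvValid (w ++ s))).length
              = (P.filter (fun s => pvValid (w ++ s))).length := by
            simp [hv]
          simp at hf ⊢; omega

-- ---------- fold-of-max algebra (fm m l = l.foldl max m over Int) ----------

theorem pvFm_hoist (l : List Int) : ∀ (a b : Int),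
    l.foldl max (max a b) = max (l.foldl max a) b := by
  induction l with
  | nil => intro a b; rfl
  | cons x l ih =>
    intro a b
    simp only [List.foldl_cons]
    rw [max_right_comm a b x, ih]

theorem pvFm_le_seed (l : List Int) : ∀ a : Int, a ≤ l.foldl max a := by
  induction l with
  | nil => intro a; exact le_refl a
  | cons x l ih => intro a; exact le_trans (le_max_left a x) (ih _)

theorem pvFm_mem_le (l : List Int) : ∀ (a x : Int), x ∈ l → x ≤ l.foldl max a := by
  induction l with
  | nil => intro a x hx; simp at hx
  | cons y l ih =>
    intro a x hx
    rcases List.mem_cons.1 hx with rfl | hx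
    · exact le_trans (le_max_right a x) (pvFm_le_seed l _)
    · exact ih _ x hx

theorem pvFm_dominated (l : List Int) : ∀ a : Int, (∀ x ∈ l, x ≤ a) → l.foldl max a = a := by
  induction l with
  | nil => intro a _; rfl
  | cons x l ih =>
    intro a h
    simp only [List.foldl_cons, max_eq_left (h x (by simp))]
    exact ih a (fun y hy => h y (by simp [hy]))

theorem pvFm_swap (l1 : List Int) : ∀ (l2 : List Int) (m : Int),
    l2.foldl max (l1.foldl max m) = l1.foldl max (l2.foldl max m) := by
  induction l1 with
  | nil => intro l2 m; rfl
  | cons x l1 ih =>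
    intro l2 m
    simp only [List.foldl_cons]
    rw [ih l2 (max m x), pvFm_hoist l2 m x]

-- a seed built as fold-max of pointwise smaller values over the same index list is absorbed
theorem pvFm_absorb {α : Type} (h1 h2 : α → Int) :
    ∀ (F : List α) (M : Int), (∀ u ∈ F, h1 u ≤ h2 u) →
    (F.map h2).foldl max ((F.map h1).foldl max M) = (F.map h2).foldl max M := by
  intro F
  induction F with
  | nil => intro M _; rfl
  | cons u F ih =>
    intro M hle
    simp only [List.map_cons, List.foldl_cons]
    rw [pvFm_hoist (F.map h1) M (h1 u), max_assoc, max_eq_right (hle u (by simp)),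
        pvFm_hoist (F.map h2) ((F.map h1).foldl max M) (h2 u),
        pvFm_hoist (F.map h2) M (h2 u),
        ih M (fun x hx => hle x (by simp [hx]))]

-- splitting a fold over 'if P u then max (g u) (g' u) else g u' into two folds
theorem pvFm_split {α : Type} (P : α → Bool) (g g' : α → Int) :
    ∀ (U : List α) (m : Int),
    (U.map (fun u => if P u then max (g u) (g' u) else g u)).foldl max m =
      ((U.filter P).map g').foldl max ((U.map g).foldl max m) := by
  intro U
  induction U with
  | nil => intro m; rfl
  | cons u U ih =>
    intro m
    by_cases hp : P u = true
    · simp only [List.map_cons, List.foldl_cons, List.filter_cons, hp, if_true]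
      rw [ih, ← max_assoc, pvFm_hoist (U.map g) _ (g' u)]
    · simp only [Bool.not_eq_true] at hp
      simp [List.map_cons, List.foldl_cons, hp, ih]

-- ---------- facts about pvGo ----------

theorem pvGo_nonneg : ∀ (ws : List String) (s : PySem.Set Char), 0 ≤ pvGo ws s := by
  intro ws
  induction ws with
  | nil => intro s; simp [pvGo]
  | cons w ws ih =>
    intro s
    simp only [pvGo]
    split
    · exact le_trans (ih s) (le_max_left _ _)
    · exact ih s

-- pvGo only inspects 'used' through membership
theorem pvGo_congr : ∀ (ws : List String) (s1 s2 : PySem.Set Char),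
    (∀ c, c ∈ s1 ↔ c ∈ s2) → pvGo ws s1 = pvGo ws s2 := by
  intro ws
  induction ws with
  | nil => intro s1 s2 _; rfl
  | cons w ws ih =>
    intro s1 s2 hmem
    have hd : PySem.Set.isdisjoint s1 (PySem.Set.ofList w.toList)
        = PySem.Set.isdisjoint s2 (PySem.Set.ofList w.toList) := by
      by_cases h : PySem.Set.isdisjoint s2 (PySem.Set.ofList w.toList) = true
      · rw [h, PySem.Set.isdisjoint_iff]
        intro x hx
        exact (PySem.Set.isdisjoint_iff _ _).1 h x ((hmem x).1 hx)
      · rw [Bool.eq_false_iff.2 h, ← Bool.not_eq_true]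
        intro h1
        exact h ((PySem.Set.isdisjoint_iff _ _).2
          (fun x hx => (PySem.Set.isdisjoint_iff _ _).1 h1 x ((hmem x).2 hx)))
    simp only [pvGo, hd, ih s1 s2 hmem]
    split
    · rw [ih (PySem.Set.union s1 _) (PySem.Set.union s2 _) ?_]
      intro c
      simp only [PySem.Set.mem_union, hmem c]
    · rfl

-- B's branch condition at a nodup frontier element u equals A's filter test valid(w+u)
theorem pvCond (w u : List Char) (hu : u.Nodup) :
    ((PySem.Set.len (PySem.Set.ofList w) == (w.length : Int)) &&
      PySem.Set.isdisjoint (PySem.Set.ofList u) (PySem.Set.ofList w)) = pvValid (w ++ u) := by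
  by_cases hw : w.Nodup
  · have h1 : (PySem.Set.len (PySem.Set.ofList w) == (w.length : Int)) = true := by
      simp [PySem.Set.len, PySem.Set.ofList_eq_self_of_nodup w hw]
    by_cases hd : ∀ a ∈ w, a ∉ u
    · have h2 : PySem.Set.isdisjoint (PySem.Set.ofList u) (PySem.Set.ofList w) = true := by
        rw [PySem.Set.isdisjoint_iff]
        intro x hx hxw
        exact hd x (by simpa [PySem.Set.mem_ofList] using hxw)
          (by simpa [PySem.Set.mem_ofList] using hx)
      have h3 : pvValid (w ++ u) = true := by
        rw [pvValid_iff, List.nodup_append]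
        exact ⟨hw, hu, fun a ha b hb => by rintro rfl; exact hd a ha hb⟩
      rw [h1, h2, h3]; rfl
    · push Not at hd
      obtain ⟨a, haw, hau⟩ := hd
      have h2 : PySem.Set.isdisjoint (PySem.Set.ofList u) (PySem.Set.ofList w) = false := by
        rw [← Bool.not_eq_true, PySem.Set.isdisjoint_iff]
        push Not
        exact ⟨a, by simpa [PySem.Set.mem_ofList] using hau,
          by simpa [PySem.Set.mem_ofList] using haw⟩
      have h3 : pvValid (w ++ u) = false := by
        rw [← Bool.not_eq_true, pvValid_iff, List.nodup_append]
        rintro ⟨-, -, hdis⟩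
        exact hdis a haw a hau rfl
      rw [h2, h3, Bool.and_false]
  · have h1 : (PySem.Set.len (PySem.Set.ofList w) == (w.length : Int)) = false := by
      have hv : pvValid w = false := by
        rw [← Bool.not_eq_true, pvValid_iff]; exact hw
      simp only [pvValid, beq_eq_false_iff_ne, ne_eq] at hv
      simp only [beq_eq_false_iff_ne, ne_eq]
      exact fun h => hv h.symm
    rw [h1, Bool.false_and]
    have h3 : pvValid (w ++ u) = false := by
      rw [← Bool.not_eq_true, pvValid_iff, List.nodup_append]
      rintro ⟨hw', -, -⟩
      exact hw hw'
    rw [h3]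

-- the contribution of frontier element u with the remaining words ws
def pvG (ws : List String) (u : List Char) : Int :=
  (u.length : Int) + pvGo ws (PySem.Set.ofList u)

theorem pvG_cons (w : String) (ws : List String) (u : List Char) (hu : u.Nodup) :
    pvG (w :: ws) u =
      if pvValid (w.toList ++ u) then max (pvG ws u) (pvG ws (w.toList ++ u))
      else pvG ws u := by
  have hc := pvCond w.toList u hu
  simp only [pvG, pvGo] at *
  rw [hc]
  by_cases hv : pvValid (w.toList ++ u) = true
  · simp only [hv, if_true]
    have hcongr : pvGo ws (PySem.Set.union (PySem.Set.ofList u) (PySem.Set.ofList w.toList))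
        = pvGo ws (PySem.Set.ofList (w.toList ++ u)) := by
      apply pvGo_congr
      intro c
      simp only [PySem.Set.mem_union, PySem.Set.mem_ofList, List.mem_append]
      tauto
    rw [hcongr]
    simp only [List.length_append]
    push_cast
    omega
  · simp only [Bool.not_eq_true] at hv
    simp [hv]

-- ---------- the main invariant-free induction ----------

theorem pvMain : ∀ (ws : List String) (U : List (List Char)) (m : Int),
    (∀ w ∈ ws, w ≠ "") → (∀ u ∈ U, u.Nodup) → (∀ u ∈ U, (u.length : Int) ≤ m) →
    (ws.foldl
      (fun (st : List (List Char) × Int) word =>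
        pvInner word.toList (2 * st.1.length + 1) st.1 st.1 st.2) (U, m)).2 =
    (U.map (pvG ws)).foldl max m := by
  intro ws
  induction ws with
  | nil =>
    intro U m _ _ hlen
    simp only [List.foldl_nil]
    rw [eq_comm]
    apply pvFm_dominated
    intro x hx
    obtain ⟨u, hu, rfl⟩ := List.mem_map.1 hx
    simp only [pvG, pvGo, add_zero]
    exact hlen u hu
  | cons w ws ih =>
    intro U m hne hnd hlen
    have hwl : w.toList ≠ [] := by
      simpa [String.toList_eq_nil_iff] using hne w (by simp)
    -- one pass of A's inner loop = snapshot filter-append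
    have hspec := pvInner_spec w.toList hwl U [] U m (2 * U.length + 1)
      (by intro q hq; simp at hq)
      (by have := List.length_filter_le (fun s => pvValid (w.toList ++ s)) U
          simp only [List.length_nil]; omega)
    simp only [List.append_nil] at hspec
    simp only [List.foldl_cons, hspec]
    set P : List Char → Bool := fun s => pvValid (w.toList ++ s) with hP
    set F := U.filter P with hF
    -- the new max m' as a fold of the lengths over F
    have hm' : (F.foldl (fun m s => max m ((w.toList.length : Int) + (s.length : Int))) m)
        = (F.map (fun s => (w.toList.length : Int) + (s.length : Int))).foldl max m := by
      rw [List.foldl_map]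
    rw [hm']
    -- apply the IH at the new state
    rw [ih (U ++ F.map (w.toList ++ ·)) _
      (fun x hx => hne x (by simp [hx]))
      ?nodup ?len]
    case nodup =>
      intro u hu
      rcases List.mem_append.1 hu with h | h
      · exact hnd u h
      · obtain ⟨s, hs, rfl⟩ := List.mem_map.1 h
        exact (pvValid_iff _).1 (by simpa [hP] using (List.mem_filter.1 hs).2)
    case len =>
      intro u hu
      rcases List.mem_append.1 hu with h | h
      · exact le_trans (hlen u h)
          (pvFm_le_seed (F.map fun s => (w.toList.length : Int) + (s.length : Int)) m)
      · obtain ⟨s, hs, rfl⟩ := List.mem_map.1 h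
        apply pvFm_mem_le
        simp only [List.mem_map]
        exact ⟨s, hs, by push_cast [List.length_append]; ring⟩
    -- now pure fold algebra
    rw [List.map_append, List.map_map]
    rw [List.foldl_append]
    -- rewrite RHS elementwise with pvG_cons, then split
    have hmapeq : U.map (pvG (w :: ws)) =
        U.map (fun u => if P u then max (pvG ws u) (pvG ws (w.toList ++ u)) else pvG ws u) := by
      apply List.map_congr_left
      intro u hu
      exact pvG_cons w ws u (hnd u hu)
    rw [hmapeq, pvFm_split P (pvG ws) (fun u => pvG ws (w.toList ++ u)) U m]
    -- LHS: swap the seed fold past the U-fold, then absorb it into the F-fold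
    rw [pvFm_swap (F.map fun s => (w.toList.length : Int) + (s.length : Int)) (U.map (pvG ws)) m]
    have habs := pvFm_absorb (fun s => (w.toList.length : Int) + (s.length : Int))
      (fun u => pvG ws (w.toList ++ u)) F ((U.map (pvG ws)).foldl max m) ?_
    · rw [← hF] at *
      exact habs
    · intro u _
      simp only [pvG, List.length_append]
      have := pvGo_nonneg ws (PySem.Set.ofList (w.toList ++ u))
      push_cast
      omega

-- ===== VERDICT (by name: the statement is the Claim_ definition above) =====
theorem max_len_str_unique_chars_spec : Claim_equal_max_len_str_unique_chars := by
  intro words _ hpre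
  unfold Spec_max_len_str_unique_chars max_len_str_unique_chars max_len_str_unique_chars_alt
  have hne : ∀ w ∈ words, w ≠ "" := fun w hw heq => hpre (heq ▸ hw)
  rw [pvMain words [[]] 0 hne (by simp) (by simp)]
  simp only [List.map_cons, List.map_nil, List.foldl_cons, List.foldl_nil, pvG,
    List.length_nil, Nat.cast_zero, zero_add]
  rw [pvGo_congr words (PySem.Set.ofList []) PySem.Set.empty
    (by intro c; simp [PySem.Set.empty])]
  exact max_eq_right (pvGo_nonneg words PySem.Set.empty)
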